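-- pv_equiv track=rewrite | github.com/tnv1154/Python-Ptit | PY01043_So thuan nghich chan.py | check
-- ===== SOURCE A (Python) =====
-- def check(n):
--     if len(str(n)) % 2 != 0:
--         return False
--     s = str(n)
--     reverse_s = s[::-1]
--     if s != reverse_s:
--         return False
--     for i in s:
--         if int(i) % 2 != 0:
--             return False
--     return True
-- ===== SOURCE B (Python) =====
-- def check(n):
--     s = str(n)
--     if len(s) % 2 != 0:
--         return False
--     for i in range(len(s) // 2):
--         if s[i] != s[len(s) - 1 - i]:
--             return False
--         if int(s[i]) % 2 != 0:
--             return False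
--     return True
-- ===== Notes on version B (the rewrite author's own statement) =====
-- stated objective: alternative
-- what changed: Replaces A's reverse-the-string comparison plus a second full pass parsing every digit with a single half-length two-pointer loop that checks the mirror equality and the parity of the first-half digit together (parity of the mirrored half follows from the palindrome property).
import Mathlib
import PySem

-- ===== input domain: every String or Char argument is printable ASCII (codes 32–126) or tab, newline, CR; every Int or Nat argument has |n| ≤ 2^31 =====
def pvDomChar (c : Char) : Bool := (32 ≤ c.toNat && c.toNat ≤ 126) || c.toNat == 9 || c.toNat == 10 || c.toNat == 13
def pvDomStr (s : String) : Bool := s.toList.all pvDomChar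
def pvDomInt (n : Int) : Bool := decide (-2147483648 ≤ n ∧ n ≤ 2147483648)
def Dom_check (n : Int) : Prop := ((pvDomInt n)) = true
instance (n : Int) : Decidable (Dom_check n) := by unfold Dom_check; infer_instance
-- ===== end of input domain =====

-- B merges A's reverse-and-compare pass and its separate all-digits parity pass
-- into one half-length two-pointer loop (return-value equivalence; neither mutates anything).

-- ===== PORT A =====
-- 'for i in s: if int(i) % 2 != 0: return False' ; int(i) via PySem.Int.ofStr?
-- (the none branch = Python ValueError; unreachable here since the loop is only
-- reached when str(n) is a palindrome, hence all-digits)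
def digitsEvenA : List Char → Bool
  | [] => true
  | c :: rest =>
    match PySem.Int.ofStr? (String.mk [c]) with
    | some v => if v % 2 ≠ 0 then false else digitsEvenA rest
    | none => false

def check (n : Int) : Bool :=
  if (PySem.Int.toStr n).toList.length % 2 ≠ 0 then false
  else
    let s := (PySem.Int.toStr n).toList
    let reverse_s := s.reverse        -- s[::-1]
    if s ≠ reverse_s then false
    else digitsEvenA s

-- ===== PORT B =====
-- body of B's loop at index i: s[i] != s[len(s)-1-i] → False, int(s[i]) odd → False
-- (the none branches = Python IndexError/ValueError; unreachable for i < len(s)//2)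
def pairOK (s : List Char) (i : Nat) : Bool :=
  match s[i]?, s[s.length - 1 - i]? with
  | some a, some b =>
    a == b &&
      (match PySem.Int.ofStr? (String.mk [a]) with
       | some v => decide (v % 2 = 0)
       | none => false)
  | _, _ => false

def check_alt (n : Int) : Bool :=
  let s := (PySem.Int.toStr n).toList
  if s.length % 2 ≠ 0 then false
  else (List.range (s.length / 2)).all (pairOK s)

-- ===== PRECONDITION & SPEC =====
def Spec_check (n : Int) (out : Bool) : Prop := out = check_alt n
instance (n : Int) (out : Bool) : Decidable (Spec_check n out) := by unfold Spec_check; infer_instance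

-- ===== CLAIM (what is proved, stated in full; the proofs are below) =====
def Claim_equal_check : Prop := ∀ (n : Int), Dom_check n → Spec_check n (check n)

-- ===== LEMMAS AND PROOFS =====

-- parity predicate on one character, as B tests it
def chOK (c : Char) : Bool :=
  match PySem.Int.ofStr? (String.mk [c]) with
  | some v => decide (v % 2 = 0)
  | none => false

theorem digitsEvenA_eq_all (s : List Char) : digitsEvenA s = s.all chOK := by
  induction s with
  | nil => rfl
  | cons c rest ih =>
    simp only [digitsEvenA, List.all_cons, chOK]
    cases h : PySem.Int.ofStr? (String.mk [c]) with
    | none => simp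
    | some v =>
      by_cases hv : v % 2 = 0 <;> simp [hv, ih]

theorem pairOK_eq (s : List Char) (i : Nat) (hi : i < s.length)
    (hj : s.length - 1 - i < s.length) :
    pairOK s i = (decide (s[i] = s[s.length - 1 - i]) && chOK s[i]) := by
  simp [pairOK, hi, hj, chOK, Bool.beq_eq_decide_eq]

theorem half_iff (s : List Char) (he : s.length % 2 = 0) :
    ((∀ (i : Nat) (h : i < s.length), s[i] = s[s.length - 1 - i]'(by omega)) ∧
      (∀ (i : Nat) (h : i < s.length), chOK s[i] = true)) ↔
    (∀ (i : Nat) (h : i < s.length / 2),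
      s[i]'(by omega) = s[s.length - 1 - i]'(by omega) ∧ chOK (s[i]'(by omega)) = true) := by
  constructor
  · rintro ⟨hp, hd⟩ i h
    exact ⟨hp i (by omega), hd i (by omega)⟩
  · intro H
    constructor
    · intro i h
      by_cases hlt : i < s.length / 2
      · exact (H i hlt).1
      · have hj : s.length - 1 - i < s.length / 2 := by omega
        have := (H _ hj).1
        have hidx : s.length - 1 - (s.length - 1 - i) = i := by omega
        simp only [hidx] at this
        exact this.symm
    · intro i h
      by_cases hlt : i < s.length / 2
      · exact (H i hlt).2
      · have hj : s.length - 1 - i < s.length / 2 := by omega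
        have hpal := (H _ hj).1
        have hd := (H _ hj).2
        have hidx : s.length - 1 - (s.length - 1 - i) = i := by omega
        simp only [hidx] at hpal
        rw [hpal] at hd
        exact hd

theorem palindrome_iff (s : List Char) :
    s = s.reverse ↔ ∀ (i : Nat) (h : i < s.length), s[i] = s[s.length - 1 - i]'(by omega) := by
  constructor
  · intro hrev i h
    rw [List.getElem_of_eq hrev h, List.getElem_reverse]
  · intro H
    apply List.ext_getElem (by simp)
    intro i h1 h2
    rw [List.getElem_reverse]
    exact H i h1

theorem core (s : List Char) (he : s.length % 2 = 0) :
    (if s ≠ s.reverse then false else digitsEvenA s) =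
      (List.range (s.length / 2)).all (pairOK s) := by
  rw [digitsEvenA_eq_all]
  have hrng : (List.range (s.length / 2)).all (pairOK s) =
      decide (∀ (i : Nat) (h : i < s.length / 2),
        s[i]'(by omega) = s[s.length - 1 - i]'(by omega) ∧ chOK (s[i]'(by omega)) = true) := by
    rcases Bool.eq_false_or_eq_true ((List.range (s.length / 2)).all (pairOK s)) with hb | hb <;>
      rw [hb]
    · symm; rw [decide_eq_true_iff]
      intro i hi
      rw [List.all_eq_true] at hb
      have := hb i (List.mem_range.mpr hi)
      rw [pairOK_eq s i (by omega) (by omega)] at this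
      simp only [Bool.and_eq_true, decide_eq_true_iff] at this
      exact this
    · symm; rw [decide_eq_false_iff_not]
      intro H
      rw [← Bool.not_eq_true, List.all_eq_true] at hb
      push_neg at hb
      obtain ⟨i, hi, hpi⟩ := hb
      rw [List.mem_range] at hi
      rw [pairOK_eq s i (by omega) (by omega)] at hpi
      obtain ⟨h1, h2⟩ := H i hi
      rw [h1] at h2
      simp [h1, h2] at hpi
    
  rw [hrng]
  have hall : s.all chOK = decide (∀ (i : Nat) (h : i < s.length), chOK s[i] = true) := by
    rcases Bool.eq_false_or_eq_true (s.all chOK) with hb | hb <;> rw [hb]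
    · symm; rw [decide_eq_true_iff]
      intro i hi
      exact (List.all_eq_true.mp hb) _ (List.mem_iff_getElem.mpr ⟨i, hi, rfl⟩)
    · symm; rw [decide_eq_false_iff_not]
      intro H
      rw [← Bool.not_eq_true, List.all_eq_true] at hb
      push_neg at hb
      obtain ⟨c, hc, hpc⟩ := hb
      obtain ⟨i, hi, rfl⟩ := List.mem_iff_getElem.mp hc
      exact hpc (H i hi)
  by_cases hpal : s = s.reverse
  · rw [if_neg (not_not_intro hpal)]
    rw [hall, decide_eq_decide]
    constructor
    · intro Hall
      exact (half_iff s he).mp ⟨(palindrome_iff s).mp hpal, Hall⟩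
    · intro H
      exact ((half_iff s he).mpr H).2
  · simp only [ne_eq, hpal, not_false_eq_true, if_true]
    symm; rw [decide_eq_false_iff_not]
    intro H
    exact hpal ((palindrome_iff s).mpr ((half_iff s he).mpr H).1)

-- ===== VERDICT (by name: the statement is the Claim_ definition above) =====
theorem check_spec : Claim_equal_check := by
  intro n _
  unfold Spec_check check check_alt
  by_cases he : (PySem.Int.toStr n).toList.length % 2 ≠ 0
  · rw [if_pos he, if_pos he]
  · rw [if_neg he, if_neg he]
    push_neg at he
    exact core _ he
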